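-- pv_equiv track=rewrite | github.com/9jinseok/Algorithm | LINE/2.py | solution
-- ===== SOURCE A (Python) =====
-- def solution(research, n, k):
--     alpha = []
--     for str in research:
--          for c in str:
--             if not c in alpha:
--                 alpha.append(c)
--     alpha.sort()
--
--     cnt = [0 for _ in range(len(alpha))]
--     for i in range(len(alpha)):
--         a = alpha[i]
--         for j in range(len(research) - n + 1):
--             tot = 0
--             chk = True
--             for l in range(j,j+n):
--                 if research[l].count(a) < k:
--                     chk = False
--                     break
--                 tot += research[l].count(a)
--
--             if tot < 2 * n * k:
--                 chk = False
--             if chk: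
--                 cnt[i] += 1
--
--     max = 0
--     maxIdx = -1
--     for i in range(len(cnt)):
--         if cnt[i] > max:
--             maxIdx = i
--             max = cnt[i]
--
--     if max == 0:
--         return "None"
--     return alpha[maxIdx]
-- ===== SOURCE B (Python) =====
-- def solution(research, n, k):
--     chars = sorted({c for s in research for c in s})
--     R = len(research)
--     need = 2 * n * k
--     best = 0
--     best_char = "None"
--     for a in chars:
--         counts = [s.count(a) for s in research]
--         ps = [0]  # prefix sums of occurrence counts
--         pb = [0]  # prefix counts of strings with fewer than k occurrences
--         s_acc = 0
--         b_acc = 0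
--         for c in counts:
--             s_acc += c
--             b_acc += 1 if c < k else 0
--             ps.append(s_acc)
--             pb.append(b_acc)
--         valid = 0
--         for j in range(R - n + 1):
--             if pb[j + n] == pb[j] and ps[j + n] - ps[j] >= need:
--                 valid += 1
--         if valid > best:
--             best = valid
--             best_char = a
--     return best_char
-- ===== Notes on version B (the rewrite author's own statement) =====
-- stated objective: alternative
-- what changed: Counts each character's occurrences per string once and decides every window in O(1) via two prefix arrays (occurrence sums and below-k indicators), instead of A's per-window rescans with str.count and an early break; Pre_ excludes negative window lengths n < 0, outside the natural domain of a consecutive-window problem, where A counts vacuously valid empty windows and B's prefix indexing raises IndexError.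
-- outside the precondition, e.g. on solution(['a'], -1, 1): A returns 'a', B raises IndexError
import Mathlib
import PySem

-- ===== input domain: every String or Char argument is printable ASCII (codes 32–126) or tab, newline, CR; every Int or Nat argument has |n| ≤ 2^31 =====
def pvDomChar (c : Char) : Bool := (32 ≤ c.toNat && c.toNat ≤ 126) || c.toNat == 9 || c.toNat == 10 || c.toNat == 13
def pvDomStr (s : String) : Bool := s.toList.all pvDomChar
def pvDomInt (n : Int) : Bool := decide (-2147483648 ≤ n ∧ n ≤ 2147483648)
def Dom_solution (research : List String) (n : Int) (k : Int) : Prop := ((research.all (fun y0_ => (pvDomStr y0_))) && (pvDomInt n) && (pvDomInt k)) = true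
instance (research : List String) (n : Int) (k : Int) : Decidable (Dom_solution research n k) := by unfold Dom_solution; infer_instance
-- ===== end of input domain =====

-- B replaces A's per-character re-scanning of every window string (str.count inside three
-- nested loops) by one per-string count pass and two prefix arrays (occurrence sums and
-- below-k indicators) that decide each window in O(1): a different algorithm of comparable
-- measured cost (no speed claim).

-- s.count(a) for a single character a (both Pythons call it identically)
def charCnt (s : String) (a : Char) : Int := (PySem.Str.count s (String.singleton a) : Int)

-- ===== PORT A =====
-- inner 'for l in range(j, j+n)' loop with its break; state = tot, returns (tot, chk)
def solA_lloop (research : List String) (a : Char) (k : Int) : List Int → Int → Int × Bool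
  | [], tot => (tot, true)
  | l :: rest, tot =>
    if charCnt ((PySem.List.pyGet? research l).getD "") a < k then (tot, false)
    else solA_lloop research a k rest (tot + charCnt ((PySem.List.pyGet? research l).getD "") a)

-- body of the j-loop: the window check for one j
def solA_check (research : List String) (a : Char) (n k : Int) (j : Int) : Bool :=
  let r := solA_lloop research a k (PySem.List.pyRange j (j + n) 1) 0
  if r.1 < 2 * n * k then false else r.2

-- 'for j in range(len(research) - n + 1): … if chk: cnt[i] += 1'
def solA_count (research : List String) (a : Char) (n k : Int) : Int :=
  (PySem.List.pyRange 0 (PySem.List.len research - n + 1) 1).foldl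
    (fun cnt j => if solA_check research a n k j then cnt + 1 else cnt) 0

def solution (research : List String) (n : Int) (k : Int) : String :=
  let alpha0 := research.foldl
    (fun al s => s.toList.foldl (fun al c => if c ∈ al then al else al ++ [c]) al) []
  let alpha := PySem.List.sorted alpha0 (fun c => c) false
  let cnt := alpha.map (fun a => solA_count research a n k)
  let m := (PySem.List.pyRange 0 (PySem.List.len cnt) 1).foldl
    (fun (st : Int × Int) i =>
      if PySem.List.pyGetD cnt i 0 > st.1 then (PySem.List.pyGetD cnt i 0, i) else st) (0, -1)
  if m.1 = 0 then "None" else String.singleton (PySem.List.pyGetD alpha m.2 ' ')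

-- ===== PORT B =====
-- the prefix-building loop of Source B: state = (s_acc, b_acc, ps, pb)
def solB_prefix (k : Int) : List Int → Int × Int × List Int × List Int → Int × Int × List Int × List Int
  | [], st => st
  | c :: rest, st =>
    let s' := st.1 + c
    let b' := st.2.1 + (if c < k then 1 else 0)
    solB_prefix k rest (s', b', st.2.2.1 ++ [s'], st.2.2.2 ++ [b'])

-- number of valid windows for one character
def solB_valid (research : List String) (a : Char) (n k : Int) : Int :=
  let counts := research.map (fun s => charCnt s a)
  let R := PySem.List.len research
  let need := 2 * n * k
  let pp := solB_prefix k counts (0, 0, [0], [0])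
  let ps := pp.2.2.1
  let pb := pp.2.2.2
  (PySem.List.pyRange 0 (R - n + 1) 1).foldl
    (fun v j =>
      if PySem.List.pyGetD pb (j + n) 0 = PySem.List.pyGetD pb j 0 ∧
         PySem.List.pyGetD ps (j + n) 0 - PySem.List.pyGetD ps j 0 ≥ need
      then v + 1 else v) 0

def solution_alt (research : List String) (n : Int) (k : Int) : String :=
  let chars := PySem.List.sorted
    (PySem.Set.ofList (research.flatMap (fun s => s.toList))) (fun c => c) false
  (chars.foldl
    (fun (st : Int × String) a =>
      let v := solB_valid research a n k
      if v > st.1 then (v, String.singleton a) else st) (0, "None")).2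

-- ===== PRECONDITION & SPEC =====
-- Pre_ excludes only negative window lengths n < 0, outside a consecutive-window problem's
-- natural domain: there A counts vacuously valid empty windows (an artefact of its empty
-- range loop) while B's prefix indexing raises IndexError.
def Pre_solution (research : List String) (n : Int) (k : Int) : Prop := 0 ≤ n
instance (research : List String) (n : Int) (k : Int) : Decidable (Pre_solution research n k) := by unfold Pre_solution; infer_instance

def pvWitness_solution : List String × Int × Int := (["ab", "ba"], 1, 1)

def Spec_solution (research : List String) (n : Int) (k : Int) (out : String) : Prop := out = solution_alt research n k
instance (research : List String) (n : Int) (k : Int) (out : String) : Decidable (Spec_solution research n k out) := by unfold Spec_solution; infer_instance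

-- ===== CLAIM (what is proved, stated in full; the proofs are below) =====
def Claim_equal_solution : Prop := ∀ (research : List String) (n : Int) (k : Int), Dom_solution research n k → Pre_solution research n k → Spec_solution research n k (solution research n k)

-- ===== LEMMAS AND PROOFS =====

-- per-index count value A reads (research[l].count(a))
def cAt (research : List String) (a : Char) (l : Int) : Int :=
  charCnt ((PySem.List.pyGet? research l).getD "") a

lemma lloop_snd (research : List String) (a : Char) (k : Int) :
    ∀ (L : List Int) (tot : Int),
      (solA_lloop research a k L tot).2 = L.all (fun l => !(cAt research a l < k)) := by
  intro L
  induction L with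
  | nil => intro tot; simp [solA_lloop]
  | cons l rest ih =>
    intro tot
    by_cases h : cAt research a l < k
    · simp only [solA_lloop, cAt] at *
      simp [h]
    · simp only [solA_lloop, cAt] at *
      simp [h, ih]

lemma lloop_fst (research : List String) (a : Char) (k : Int) :
    ∀ (L : List Int) (tot : Int),
      L.all (fun l => !(cAt research a l < k)) = true →
      (solA_lloop research a k L tot).1 = tot + (L.map (cAt research a)).sum := by
  intro L
  induction L with
  | nil => intro tot _; simp [solA_lloop]
  | cons l rest ih =>
    intro tot hall
    simp only [List.all_cons, Bool.and_eq_true, Bool.not_eq_true'] at hall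
    obtain ⟨h1, h2⟩ := hall
    have h1' : ¬ cAt research a l < k := by simpa using h1
    simp only [solA_lloop, cAt] at *
    rw [if_neg h1']
    rw [ih _ (by simpa using h2)]
    simp [cAt]
    ring

lemma check_eq (research : List String) (a : Char) (n k j : Int) :
    solA_check research a n k j =
      ((PySem.List.pyRange j (j + n) 1).all (fun l => !(cAt research a l < k)) &&
        decide (2 * n * k ≤ ((PySem.List.pyRange j (j + n) 1).map (cAt research a)).sum)) := by
  unfold solA_check
  set L := PySem.List.pyRange j (j + n) 1 with hL
  by_cases hall : L.all (fun l => !(cAt research a l < k)) = true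
  · have h1 := lloop_fst research a k L 0 hall
    have h2 := lloop_snd research a k L 0
    rw [hall] at h2
    simp only [h1, h2, hall, Bool.true_and, zero_add]
    split_ifs with hs <;> simp <;> omega
  · have h2 := lloop_snd research a k L 0
    simp only [Bool.not_eq_true] at hall
    rw [hall] at h2
    simp [h2, hall]

lemma prefix_spec (k : Int) :
    ∀ (cs : List Int) (s b : Int) (ps pb : List Int),
      solB_prefix k cs (s, b, ps, pb) =
        (s + cs.sum, b + (cs.countP (fun c => decide (c < k)) : Int),
         ps ++ (List.range cs.length).map (fun i => s + (cs.take (i+1)).sum),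
         pb ++ (List.range cs.length).map
           (fun i => b + ((cs.take (i+1)).countP (fun c => decide (c < k)) : Int))) := by
  intro cs
  induction cs with
  | nil => intro s b ps pb; simp [solB_prefix]
  | cons c rest ih =>
    intro s b ps pb
    show solB_prefix k rest _ = _
    rw [ih]
    simp only [Prod.mk.injEq]
    refine ⟨by simp; ring, ?_, ?_, ?_⟩
    · simp [List.countP_cons]
      by_cases h : c < k <;> simp [h] <;> push_cast <;> ring
    · simp only [List.length_cons, List.range_succ_eq_map, List.map_cons, List.map_map,
        List.append_assoc, List.singleton_append, List.take_succ_cons, List.take_zero,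
        List.sum_cons, List.sum_nil, add_zero, Function.comp]
      congr 2
      apply List.map_congr_left
      intro i _
      simp [List.take_succ_cons, List.sum_cons]
      ring
    · simp only [List.length_cons, List.range_succ_eq_map, List.map_cons, List.map_map,
        List.append_assoc, List.singleton_append, List.take_succ_cons, List.take_zero,
        List.countP_cons, List.countP_nil, Function.comp]
      congr 1
      by_cases h : c < k <;> simp [h] <;> intro a _ <;> push_cast <;> ring

lemma window_map (research : List String) (a : Char) (jn nn : Nat)
    (h : jn + nn ≤ research.length) :
    (PySem.List.pyRange (jn : Int) ((jn : Int) + (nn : Int)) 1).map (cAt research a) =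
      ((research.map (fun s => charCnt s a)).drop jn).take nn := by
  rw [PySem.List.pyRange_one]
  have h1 : ((jn : Int) + (nn : Int) - (jn : Int)).toNat = nn := by omega
  rw [h1, List.map_map]
  apply List.ext_getElem
  · simp; omega
  · intro i h2 h3
    simp only [List.getElem_map, List.getElem_range, Function.comp_apply]
    have hi : jn + i < research.length := by
      simp only [List.length_map, List.length_range] at h2; omega
    have hc : (jn : Int) + (i : Int) = ((jn + i : Nat) : Int) := by push_cast; ring
    simp only [cAt]
    rw [hc, PySem.List.pyGet?_natCast, List.getElem?_eq_getElem hi]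
    simp [List.getElem_take, List.getElem_drop]

lemma ps_get (k : Int) (cs : List Int) (m : Nat) (hm : m ≤ cs.length) :
    PySem.List.pyGetD ((solB_prefix k cs (0, 0, [0], [0])).2.2.1) (m : Int) 0 =
      (cs.take m).sum := by
  rw [prefix_spec]
  simp only [PySem.List.pyGetD_natCast]
  cases m with
  | zero => simp
  | succ i =>
    have hi : i < cs.length := by omega
    simp [List.getD, List.getElem?_map, List.getElem?_range, hi]

lemma pb_get (k : Int) (cs : List Int) (m : Nat) (hm : m ≤ cs.length) :
    PySem.List.pyGetD ((solB_prefix k cs (0, 0, [0], [0])).2.2.2) (m : Int) 0 =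
      ((cs.take m).countP (fun c => decide (c < k)) : Int) := by
  rw [prefix_spec]
  simp only [PySem.List.pyGetD_natCast]
  cases m with
  | zero => simp
  | succ i =>
    have hi : i < cs.length := by omega
    simp [List.getD, List.getElem?_map, List.getElem?_range, hi]

lemma count_eq_valid (research : List String) (a : Char) (n k : Int) (hn : 0 ≤ n) :
    solA_count research a n k = solB_valid research a n k := by
  unfold solA_count solB_valid
  simp only [PySem.List.len_eq]
  rw [PySem.List.foldl_if_add_one, PySem.List.foldl_ite_add_one]
  congr 1
  push_cast
  congr 1
  apply List.countP_congr
  intro j hj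
  rw [PySem.List.mem_pyRange_one] at hj
  obtain ⟨hj0, hj1⟩ := hj
  set cs := research.map (fun s => charCnt s a) with hcs
  have hlen : cs.length = research.length := by simp [hcs]
  obtain ⟨jn, rfl⟩ : ∃ jn : Nat, j = (jn : Int) := ⟨j.toNat, by omega⟩
  obtain ⟨nn, rfl⟩ : ∃ nn : Nat, n = (nn : Int) := ⟨n.toNat, by omega⟩
  have hwin : jn + nn ≤ research.length := by omega
  have hsum : (jn : Int) + (nn : Int) = ((jn + nn : Nat) : Int) := by push_cast; ring
  rw [check_eq, hsum, ps_get k cs (jn + nn) (by omega), ps_get k cs jn (by omega),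
      pb_get k cs (jn + nn) (by omega), pb_get k cs jn (by omega)]
  rw [← hsum, window_map research a jn nn hwin, Bool.eq_iff_iff]
  simp only [Bool.and_eq_true, List.all_eq_true, Bool.not_eq_true', decide_eq_true_eq,
    decide_eq_false_iff_not]
  rw [← List.forall_mem_map (f := cAt research a) (P := fun c => ¬ (c < k)),
      window_map research a jn nn hwin]
  rw [List.take_add, List.countP_append, List.sum_append]
  simp only [← hcs, iff_true]
  constructor
  · rintro ⟨h1, h2⟩
    have hz : List.countP (fun c => decide (c < k)) ((cs.drop jn).take nn) = 0 :=
      List.countP_eq_zero.mpr (fun c hc => by simpa using h1 c hc)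
    constructor
    · push_cast [hz]; ring
    · omega
  · rintro ⟨h1, h2⟩
    have hz : List.countP (fun c => decide (c < k)) ((cs.drop jn).take nn) = 0 := by
      push_cast at h1; omega
    exact ⟨fun c hc => by simpa using List.countP_eq_zero.mp hz c hc, by omega⟩

lemma nonneg_count (research : List String) (a : Char) (n k : Int) :
    0 ≤ solA_count research a n k := by
  unfold solA_count
  rw [PySem.List.foldl_if_add_one]
  omega

lemma foldl_nested (g : List Char → Char → List Char) :
    ∀ (L : List String) (init : List Char),
      L.foldl (fun al s => s.toList.foldl g al) init =
        (L.flatMap (fun s => s.toList)).foldl g init := by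
  intro L
  induction L with
  | nil => intro init; simp
  | cons s rest ih => intro init; simp [List.foldl_append, ih]

lemma alpha_eq_set (research : List String) :
    research.foldl
      (fun al s => s.toList.foldl (fun al c => if c ∈ al then al else al ++ [c]) al) [] =
      PySem.Set.ofList (research.flatMap (fun s => s.toList)) := by
  rw [foldl_nested, PySem.Set.ofList_eq_foldl]
  have hstep : (fun al c => if c ∈ al then al else al ++ [c]) = PySem.Set.add (α := Char) :=
    funext fun al => funext fun c => (PySem.Set.add_eq_ite al c).symm
  rw [hstep]

lemma enumerate_map {α β : Type} (f : α → β) :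
    ∀ (xs : List α) (s : Int),
      PySem.List.enumerate (xs.map f) s =
        (PySem.List.enumerate xs s).map (fun p => (p.1, f p.2)) := by
  intro xs
  induction xs with
  | nil => intro s; simp [PySem.List.enumerate_nil]
  | cons x rest ih => intro s; simp [PySem.List.enumerate_cons, ih]

lemma sel (alpha : List Char) (v : Char → Int) (hv : ∀ a, 0 ≤ v a) :
    ∀ (L : List (Int × Char))
      (_ : ∀ p ∈ L, 0 ≤ p.1 ∧ PySem.List.pyGetD alpha p.1 ' ' = p.2)
      (mA iA : Int) (sB : String) (_ : 0 ≤ mA)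
      (_ : (mA = 0 ∧ sB = "None") ∨
             (0 < mA ∧ sB = String.singleton (PySem.List.pyGetD alpha iA ' '))),
      (let ra := L.foldl (fun st p => if v p.2 > st.1 then (v p.2, p.1) else st) (mA, iA);
       if ra.1 = 0 then "None" else String.singleton (PySem.List.pyGetD alpha ra.2 ' ')) =
      ((L.map Prod.snd).foldl
        (fun st a => if v a > st.1 then (v a, String.singleton a) else st) (mA, sB)).2 := by
  intro L
  induction L with
  | nil =>
    intro _ mA iA sB h0 hst
    rcases hst with ⟨h1, h2⟩ | ⟨h1, h2⟩
    · simp [h1, h2]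
    · simp only [List.foldl_nil, List.map_nil]
      rw [if_neg (by omega), h2]
  | cons p rest ih =>
    intro hmem mA iA sB h0 hst
    obtain ⟨hp0, hpv⟩ := hmem p (List.mem_cons_self ..)
    simp only [List.foldl_cons, List.map_cons]
    by_cases h : v p.2 > mA
    · rw [if_pos h, if_pos h]
      exact ih (fun q hq => hmem q (List.mem_cons_of_mem _ hq)) (v p.2) p.1
        (String.singleton p.2) (hv p.2) (Or.inr ⟨by omega, by rw [hpv]⟩)
    · rw [if_neg h, if_neg h]
      exact ih (fun q hq => hmem q (List.mem_cons_of_mem _ hq)) mA iA sB h0 hst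

lemma index_fold_eq_enum_fold (cnt : List Int) :
    (PySem.List.pyRange 0 (PySem.List.len cnt) 1).foldl
      (fun (st : Int × Int) i =>
        if PySem.List.pyGetD cnt i 0 > st.1 then (PySem.List.pyGetD cnt i 0, i) else st) (0, -1) =
    (PySem.List.enumerate cnt 0).foldl
      (fun (st : Int × Int) p => if p.2 > st.1 then (p.2, p.1) else st) (0, -1) := by
  rw [PySem.List.enumerate_eq_map_pyRange (d := 0), List.foldl_map]

-- ===== VERDICT (by name: the statement is the Claim_ definition above) =====
theorem solution_spec : Claim_equal_solution := by
  intro research n k _ hn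
  unfold Spec_solution
  simp only [solution, solution_alt]
  rw [alpha_eq_set]
  simp only [count_eq_valid research _ n k hn]
  set chars := PySem.List.sorted
    (PySem.Set.ofList (research.flatMap (fun s => s.toList))) (fun c => c) false with hch
  set v := fun a => solB_valid research a n k with hvdef
  have hvpos : ∀ a, 0 ≤ v a := fun a => by
    rw [hvdef]
    calc (0:Int) ≤ solA_count research a n k := nonneg_count research a n k
      _ = solB_valid research a n k := count_eq_valid research a n k hn
  rw [index_fold_eq_enum_fold, enumerate_map v chars 0, List.foldl_map]
  rw [show chars.foldl
        (fun (st : Int × String) a =>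
          if v a > st.1 then (v a, String.singleton a) else st) (0, "None") =
      ((PySem.List.enumerate chars 0).map Prod.snd).foldl
        (fun (st : Int × String) a =>
          if v a > st.1 then (v a, String.singleton a) else st) (0, "None") by
    rw [PySem.List.map_snd_enumerate]]
  have hmem : ∀ p ∈ PySem.List.enumerate chars 0,
      0 ≤ p.1 ∧ PySem.List.pyGetD chars p.1 ' ' = p.2 := by
    intro p hp
    rw [PySem.List.mem_enumerate_iff] at hp
    obtain ⟨kk, hk, rfl⟩ := hp
    refine ⟨by omega, ?_⟩
    simp [List.getD_eq_getElem, hk]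
  exact sel chars v hvpos (PySem.List.enumerate chars 0) hmem 0 (-1) "None" le_rfl
    (Or.inl ⟨rfl, rfl⟩)
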